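-- pv_equiv track=rewrite | github.com/extremelystiff/autosergency-server | sandstorm_manager.py | get_map_url_parts
-- ===== SOURCE A (Python) =====
-- def get_map_url_parts(args):
--     """Extract map URL (first arg) and parse MaxPlayers from it"""
--     if not args:
--         return '', '', '', ''
--     map_url = args[0]
--     # map_url like: Farmhouse?Scenario=Scenario_Farmhouse_Checkpoint_Security?MaxPlayers=8
--     map_part = map_url.split('?')[0]
--     scenario = ''
--     max_players = '28'
--     for part in map_url.split('?')[1:]:
--         if part.startswith('Scenario='):
--             scenario = part[9:]
--         elif part.startswith('MaxPlayers='):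
--             max_players = part[11:]
--     return map_url, map_part, scenario, max_players
-- ===== SOURCE B (Python) =====
-- def get_map_url_parts(args):
--     """Extract map URL (first arg) and parse MaxPlayers from it"""
--     if not args:
--         return '', '', '', ''
--     map_url = args[0]
--     pieces = map_url.split('?')
--     params = {}
--     for part in pieces[1:]:
--         i = part.find('=')
--         if i != -1:
--             params[part[:i]] = part[i + 1:]
--     return map_url, pieces[0], params.get('Scenario', ''), params.get('MaxPlayers', '28')
-- ===== Notes on version B (the rewrite author's own statement) =====
-- stated objective: idiomatic
-- what changed: B builds a full key->value parameter dict from the '?'-separated segments (splitting each on its first '=', last duplicate wins) and then selects 'Scenario'/'MaxPlayers' with defaults, replacing A's per-segment prefix-test branching into two mutable accumulators.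
import Mathlib
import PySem

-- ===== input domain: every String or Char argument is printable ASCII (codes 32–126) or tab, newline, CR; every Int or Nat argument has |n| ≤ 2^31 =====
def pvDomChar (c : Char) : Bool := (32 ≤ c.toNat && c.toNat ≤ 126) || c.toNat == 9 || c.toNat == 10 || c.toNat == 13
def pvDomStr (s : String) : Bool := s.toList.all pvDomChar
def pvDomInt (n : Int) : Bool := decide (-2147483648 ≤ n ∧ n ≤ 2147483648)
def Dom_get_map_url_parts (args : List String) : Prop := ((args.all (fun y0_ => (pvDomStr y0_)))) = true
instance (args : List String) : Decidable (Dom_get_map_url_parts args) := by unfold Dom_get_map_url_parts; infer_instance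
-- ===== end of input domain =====

-- B collects all '?'-separated key=value segments into a dict first (last wins), then selects the
-- 'Scenario'/'MaxPlayers' fields with defaults, instead of A's per-segment prefix branching (objective: idiomatic).


-- ===== PORT A =====
-- body of A's for-loop: state = (scenario, max_players)
def pvStepA (st : String × String) (part : String) : String × String :=
  if PySem.Str.startswith part "Scenario=" then (PySem.Str.slice part (some 9) none, st.2)
  else if PySem.Str.startswith part "MaxPlayers=" then (st.1, PySem.Str.slice part (some 11) none)
  else st

def get_map_url_parts (args : List String) : String × String × String × String :=
  match args with
  | [] => ("", "", "", "")
  | map_url :: _ =>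
    let map_part := PySem.List.pyGetD ((PySem.Str.split? map_url "?").getD []) 0 ""
    let st := (PySem.List.slice ((PySem.Str.split? map_url "?").getD []) (some 1)).foldl pvStepA ("", "28")
    (map_url, map_part, st.1, st.2)

-- ===== PORT B =====
-- body of B's for-loop: insert key=value segments into the parameter dict (i = part.find('='))
def pvStepB (d : PySem.Dict String String) (part : String) : PySem.Dict String String :=
  let i := PySem.Str.find part "="
  if i ≠ -1 then d.insert (PySem.Str.slice part none (some i)) (PySem.Str.slice part (some (i + 1)) none)
  else d

def get_map_url_parts_alt (args : List String) : String × String × String × String :=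
  match args with
  | [] => ("", "", "", "")
  | map_url :: _ =>
    let pieces := (PySem.Str.split? map_url "?").getD []
    let params := (PySem.List.slice pieces (some 1)).foldl pvStepB PySem.Dict.empty
    (map_url, PySem.List.pyGetD pieces 0 "", params.getD "Scenario" "", params.getD "MaxPlayers" "28")

-- ===== PRECONDITION & SPEC =====
def Spec_get_map_url_parts (args : List String) (out : String × String × String × String) : Prop := out = get_map_url_parts_alt args
instance (args : List String) (out : String × String × String × String) : Decidable (Spec_get_map_url_parts args out) := by unfold Spec_get_map_url_parts; infer_instance

-- ===== CLAIM (what is proved, stated in full; the proofs are below) =====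
def Claim_equal_get_map_url_parts : Prop := ∀ (args : List String), Dom_get_map_url_parts args → Spec_get_map_url_parts args (get_map_url_parts args)

-- ===== LEMMAS AND PROOFS =====

-- first '=' in pre ++ '=' :: rest sits at index pre.length when pre has no '='
lemma pv_find_append (pre rest : List Char) (h : '=' ∉ pre) :
    PySem.Chars.find (pre ++ '=' :: rest) ['='] = (pre.length : Int) := by
  have hinf : ['='] <:+: (pre ++ '=' :: rest) := ⟨pre, rest, by simp⟩
  have h0 : 0 ≤ PySem.Chars.find (pre ++ '=' :: rest) ['='] :=
    (PySem.Chars.find_nonneg_iff _ _).mpr hinf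
  obtain ⟨hpref, hmin⟩ := PySem.Chars.find_spec h0
  have hle : (PySem.Chars.find (pre ++ '=' :: rest) ['=']).toNat ≤ pre.length := by
    by_contra hlt
    push Not at hlt
    refine hmin pre.length hlt ?_
    rw [List.drop_left]
    exact ⟨rest, rfl⟩
  have hge : pre.length ≤ (PySem.Chars.find (pre ++ '=' :: rest) ['=']).toNat := by
    by_contra hlt
    push Not at hlt
    obtain ⟨t, ht⟩ := hpref
    have hq : (pre ++ '=' :: rest)[(PySem.Chars.find (pre ++ '=' :: rest) ['=']).toNat]? = some '=' := by
      have h1 := congrArg (·[0]?) ht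
      simp only [List.getElem?_drop, Nat.add_zero] at h1
      simpa using h1.symm
    rw [List.getElem?_append_left hlt] at hq
    exact h (List.mem_of_getElem? hq)
  omega

-- a key=value segment whose key is k must start with k ++ "="
lemma pv_decomp_of_key (l : List Char) (n : Nat) (t : List Char)
    (ht : ['='] ++ t = List.drop n l) (hk : List.take n l = "Scenario".toList ∨ List.take n l = "MaxPlayers".toList) :
    (PySem.Chars.startswith l "Scenario=".toList = true) ∨ (PySem.Chars.startswith l "MaxPlayers=".toList = true) := by
  have hdec : l = List.take n l ++ '=' :: t := by
    conv_lhs => rw [← List.take_append_drop n l, ← ht]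
    rw [List.singleton_append]
  rcases hk with hk | hk
  · left
    rw [PySem.Chars.startswith_iff]
    refine ⟨t, ?_⟩
    rw [hdec, hk, show "Scenario=".toList = "Scenario".toList ++ ['='] from by decide,
      List.append_assoc, List.singleton_append]
  · right
    rw [PySem.Chars.startswith_iff]
    refine ⟨t, ?_⟩
    rw [hdec, hk, show "MaxPlayers=".toList = "MaxPlayers".toList ++ ['='] from by decide,
      List.append_assoc, List.singleton_append]

-- one loop iteration: A's pair of accumulators tracks the dict's two fields
lemma pv_step (d : PySem.Dict String String) (part : String) :
    pvStepA (d.getD "Scenario" "", d.getD "MaxPlayers" "28") part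
      = ((pvStepB d part).getD "Scenario" "", (pvStepB d part).getD "MaxPlayers" "28") := by
  unfold pvStepA pvStepB
  by_cases h1 : PySem.Str.startswith part "Scenario=" = true
  · obtain ⟨rest, hrest⟩ := (PySem.Chars.startswith_iff _ _).mp ((PySem.Str.startswith_eq _ _) ▸ h1)
    have hpart : part.toList = "Scenario".toList ++ '=' :: rest := by
      rw [← hrest, show "Scenario=".toList = "Scenario".toList ++ ['='] from by decide,
        List.append_assoc, List.singleton_append]
    have hfind : PySem.Str.find part "=" = 8 := by
      rw [PySem.Str.find_eq, show "=".toList = ['='] from by decide, hpart]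
      exact pv_find_append _ _ (by decide)
    have hkey : PySem.Str.slice part none (some (8 : Int)) = "Scenario" := by
      rw [← String.toList_inj, PySem.Str.toList_slice]
      simp only [PySem.Chars.slice]
      rw [PySem.List.slice_to part.toList (show (0 : Int) ≤ 8 by norm_num), hpart]
      exact List.take_left' (by decide)
    simp only [h1, if_true, hfind]
    norm_num [PySem.Dict.getD_insert, hkey]
    exact fun hc => absurd hc (by decide)
  · by_cases h2 : PySem.Str.startswith part "MaxPlayers=" = true
    · obtain ⟨rest, hrest⟩ := (PySem.Chars.startswith_iff _ _).mp ((PySem.Str.startswith_eq _ _) ▸ h2)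
      have hpart : part.toList = "MaxPlayers".toList ++ '=' :: rest := by
        rw [← hrest, show "MaxPlayers=".toList = "MaxPlayers".toList ++ ['='] from by decide,
          List.append_assoc, List.singleton_append]
      have hfind : PySem.Str.find part "=" = 10 := by
        rw [PySem.Str.find_eq, show "=".toList = ['='] from by decide, hpart]
        exact pv_find_append _ _ (by decide)
      have hkey : PySem.Str.slice part none (some (10 : Int)) = "MaxPlayers" := by
        rw [← String.toList_inj, PySem.Str.toList_slice]
        simp only [PySem.Chars.slice]
        rw [PySem.List.slice_to part.toList (show (0 : Int) ≤ 10 by norm_num), hpart]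
        exact List.take_left' (by decide)
      simp only [h1, h2, if_true, hfind]
      norm_num [PySem.Dict.getD_insert, hkey]
      exact fun hc => absurd hc (by decide)
    · by_cases h3 : PySem.Str.find part "=" = -1
      · rw [PySem.Str.startswith_eq] at h1 h2
        rw [PySem.Str.find_eq] at h3
        simp [show PySem.Chars.startswith part.toList ['S','c','e','n','a','r','i','o','='] = false from by simpa using h1,
          show PySem.Chars.startswith part.toList ['M','a','x','P','l','a','y','e','r','s','='] = false from by simpa using h2,
          show PySem.Chars.find part.toList ['='] = -1 from by simpa using h3]
      · have h0 : 0 ≤ PySem.Chars.find part.toList "=".toList := by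
          have := PySem.Chars.neg_one_le_find part.toList "=".toList
          rw [PySem.Str.find_eq] at h3
          omega
        obtain ⟨hpref, _⟩ := PySem.Chars.find_spec h0
        obtain ⟨t, ht⟩ := hpref
        have hkey : ∀ s : String, PySem.Str.slice part none (some (PySem.Str.find part "=")) = s →
            (s.toList = "Scenario".toList ∨ s.toList = "MaxPlayers".toList) → False := by
          intro s hs hcase
          have hslist : s.toList = List.take (PySem.Chars.find part.toList "=".toList).toNat part.toList := by
            rw [← hs, PySem.Str.toList_slice]
            simp only [PySem.Chars.slice]
            rw [PySem.Str.find_eq, PySem.List.slice_to part.toList h0]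
          have ht' : ['='] ++ t = List.drop (PySem.Chars.find part.toList "=".toList).toNat part.toList := by
            simpa using ht
          rcases pv_decomp_of_key part.toList _ t ht'
              (by rw [← hslist]; exact hcase) with hc | hc
          · exact h1 ((PySem.Str.startswith_eq part "Scenario=") ▸ hc)
          · exact h2 ((PySem.Str.startswith_eq part "MaxPlayers=") ▸ hc)
        have hne1 : ("Scenario" : String) ≠ PySem.Str.slice part none (some (PySem.Str.find part "=")) := by
          intro hc
          exact hkey _ hc.symm (Or.inl rfl)
        have hne2 : ("MaxPlayers" : String) ≠ PySem.Str.slice part none (some (PySem.Str.find part "=")) := by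
          intro hc
          exact hkey _ hc.symm (Or.inr rfl)
        rw [PySem.Str.startswith_eq] at h1 h2
        rw [PySem.Str.find_eq] at h3
        have h1' : PySem.Chars.startswith part.toList ['S','c','e','n','a','r','i','o','='] = false := by
          simpa using h1
        have h2' : PySem.Chars.startswith part.toList ['M','a','x','P','l','a','y','e','r','s','='] = false := by
          simpa using h2
        have h3' : ¬ PySem.Chars.find part.toList ['='] = -1 := by simpa using h3
        have hne1' : ¬ ("Scenario" : String) = PySem.Str.slice part none (some (PySem.Chars.find part.toList ['='])) := by
          simpa using hne1
        have hne2' : ¬ ("MaxPlayers" : String) = PySem.Str.slice part none (some (PySem.Chars.find part.toList ['='])) := by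
          simpa using hne2
        simp [h1', h2', h3', PySem.Dict.getD_insert, hne1', hne2']

-- A's whole loop equals the two lookups in B's dict, for any starting dict
lemma pv_loop (ps : List String) (d : PySem.Dict String String) :
    ps.foldl pvStepA (d.getD "Scenario" "", d.getD "MaxPlayers" "28")
      = ((ps.foldl pvStepB d).getD "Scenario" "", (ps.foldl pvStepB d).getD "MaxPlayers" "28") := by
  induction ps generalizing d with
  | nil => rfl
  | cons p ps ih => rw [List.foldl_cons, List.foldl_cons, pv_step, ih]

lemma pv_loop_empty (ps : List String) :
    ps.foldl pvStepA ("", "28")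
      = ((ps.foldl pvStepB PySem.Dict.empty).getD "Scenario" "", (ps.foldl pvStepB PySem.Dict.empty).getD "MaxPlayers" "28") :=
  pv_loop ps PySem.Dict.empty

-- ===== VERDICT (by name: the statement is the Claim_ definition above) =====
theorem get_map_url_parts_spec : Claim_equal_get_map_url_parts := by
  intro args _
  show get_map_url_parts args = get_map_url_parts_alt args
  cases args with
  | nil => rfl
  | cons u rest =>
    simp only [get_map_url_parts, get_map_url_parts_alt, pv_loop_empty]
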